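-- pv_equiv track=rewrite | github.com/simoll/ve-box | ve-box.py | get_nth_token
-- ===== SOURCE A (Python) =====
-- def get_nth_token(token_list,n):
--   if n < 0:
--     return ""
--
--   for t in token_list:
--     if t.strip() == "":
--       continue
--     if n == 0:
--       return t.strip()
--     n -= 1
--
--   return ""
-- ===== SOURCE B (Python) =====
-- def get_nth_token(token_list, n):
--     tokens = [t.strip() for t in token_list if t.strip() != ""]
--     if 0 <= n < len(tokens):
--         return tokens[n]
--     return ""
-- ===== Notes on version B (the rewrite author's own statement) =====
-- stated objective: simpler
-- what changed: B materializes the stripped non-empty tokens in one comprehension and returns a direct index access (guarded to 0 <= n < len), replacing A's scan with a running decrement counter and early return.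
import Mathlib
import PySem

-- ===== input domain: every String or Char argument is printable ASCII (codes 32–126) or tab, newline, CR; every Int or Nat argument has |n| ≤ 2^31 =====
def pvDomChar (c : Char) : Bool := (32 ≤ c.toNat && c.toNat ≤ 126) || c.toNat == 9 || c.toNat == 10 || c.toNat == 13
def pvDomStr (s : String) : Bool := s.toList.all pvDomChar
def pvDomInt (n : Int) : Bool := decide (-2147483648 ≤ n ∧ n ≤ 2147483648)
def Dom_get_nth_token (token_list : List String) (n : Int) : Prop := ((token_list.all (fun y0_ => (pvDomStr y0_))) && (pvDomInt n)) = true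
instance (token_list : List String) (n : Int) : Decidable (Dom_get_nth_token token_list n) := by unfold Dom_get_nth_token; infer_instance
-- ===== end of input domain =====

-- B builds the stripped non-empty token list once and indexes it directly (objective: simpler).

-- ===== PORT A =====
-- A's for-loop with the running counter n, as structural recursion over the list.
def get_nth_token_loop (token_list : List String) (n : Int) : String :=
  match token_list with
  | [] => ""
  | t :: rest =>
    if PySem.Str.strip t == "" then get_nth_token_loop rest n
    else if n == 0 then PySem.Str.strip t
    else get_nth_token_loop rest (n - 1)

def get_nth_token (token_list : List String) (n : Int) : String :=
  if n < 0 then "" else get_nth_token_loop token_list n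

-- ===== PORT B =====
def get_nth_token_alt (token_list : List String) (n : Int) : String :=
  let tokens := (token_list.filter (fun t => PySem.Str.strip t ≠ "")).map PySem.Str.strip
  if 0 ≤ n ∧ n < tokens.length then tokens.getD n.toNat "" else ""

-- ===== PRECONDITION & SPEC =====
def Spec_get_nth_token (token_list : List String) (n : Int) (out : String) : Prop := out = get_nth_token_alt token_list n
instance (token_list : List String) (n : Int) (out : String) : Decidable (Spec_get_nth_token token_list n out) := by unfold Spec_get_nth_token; infer_instance

-- ===== CLAIM (what is proved, stated in full; the proofs are below) =====
def Claim_equal_get_nth_token : Prop := ∀ (token_list : List String) (n : Int), Dom_get_nth_token token_list n → Spec_get_nth_token token_list n (get_nth_token token_list n)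

-- ===== LEMMAS AND PROOFS =====

theorem get_nth_token_loop_eq (token_list : List String) (n : Int) (hn : 0 ≤ n) :
    get_nth_token_loop token_list n
      = ((token_list.filter (fun t => PySem.Str.strip t ≠ "")).map PySem.Str.strip).getD n.toNat "" := by
  induction token_list generalizing n with
  | nil => simp [get_nth_token_loop]
  | cons t rest ih =>
    by_cases hs : PySem.Str.strip t = ""
    · simp [get_nth_token_loop, hs, ih n hn]
    · by_cases h0 : n = 0
      · subst h0; simp [get_nth_token_loop, hs]
      · have h1 : 0 ≤ n - 1 := by omega
        have ht : (n - 1).toNat = n.toNat - 1 := by omega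
        have hpos : 0 < n.toNat := by omega
        simp [get_nth_token_loop, hs, h0, ih (n - 1) h1, ht, List.getD, List.getElem?_cons,
          Nat.pos_iff_ne_zero.mp hpos]

theorem getD_out_of_range (l : List String) (k : Nat) (h : ¬ k < l.length) :
    l.getD k "" = "" := by
  simp [List.getD, List.getElem?_eq_none (by omega : l.length ≤ k)]

-- ===== VERDICT (by name: the statement is the Claim_ definition above) =====
theorem get_nth_token_spec : Claim_equal_get_nth_token := by
  intro token_list n _
  unfold Spec_get_nth_token get_nth_token get_nth_token_alt
  by_cases hn : n < 0
  · simp [hn, show ¬ (0 ≤ n ∧ _) from fun h => absurd h.1 (by omega)]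
  · have h0 : 0 ≤ n := by omega
    rw [if_neg hn, get_nth_token_loop_eq token_list n h0]
    by_cases hlt : n < (((token_list.filter (fun t => PySem.Str.strip t ≠ "")).map PySem.Str.strip)).length
    · rw [if_pos ⟨h0, hlt⟩]
    · rw [if_neg (by intro h; exact hlt h.2)]
      exact getD_out_of_range _ _ (by omega)
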